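-- pv_equiv track=rewrite | github.com/elizabethkhoury/livingdiscussionagent | src/learn/diary_memory.py | _split_heading_blocks
-- ===== SOURCE A (Python) =====
-- def _split_heading_blocks(lines: list[str]):
--     blocks: list[tuple[str, list[str]]] = []
--     current_heading: str | None = None
--     current_lines: list[str] = []
--     for line in lines:
--         if line.startswith("### "):
--             if current_heading is not None:
--                 blocks.append((current_heading, current_lines))
--             current_heading = line.removeprefix("### ").strip()
--             current_lines = []
--         elif current_heading is not None:
--             current_lines.append(line)
--     if current_heading is not None:
--         blocks.append((current_heading, current_lines))
--     return blocks
-- ===== SOURCE B (Python) =====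
-- def _split_heading_blocks(lines: list[str]):
--     heads = [(i, line) for i, line in enumerate(lines) if line.startswith("### ")]
--     ends = [i for i, _ in heads][1:] + [len(lines)]
--     return [(line[4:].strip(), lines[i + 1:e]) for (i, line), e in zip(heads, ends)]
-- ===== Notes on version B (the rewrite author's own statement) =====
-- stated objective: simpler
-- what changed: Replaces the stateful current_heading/current_lines accumulator loop with an index-then-slice decomposition: collect the heading positions once, pair each with the next position (len(lines) as sentinel), and emit (title, slice) tuples in a comprehension.
import Mathlib
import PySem

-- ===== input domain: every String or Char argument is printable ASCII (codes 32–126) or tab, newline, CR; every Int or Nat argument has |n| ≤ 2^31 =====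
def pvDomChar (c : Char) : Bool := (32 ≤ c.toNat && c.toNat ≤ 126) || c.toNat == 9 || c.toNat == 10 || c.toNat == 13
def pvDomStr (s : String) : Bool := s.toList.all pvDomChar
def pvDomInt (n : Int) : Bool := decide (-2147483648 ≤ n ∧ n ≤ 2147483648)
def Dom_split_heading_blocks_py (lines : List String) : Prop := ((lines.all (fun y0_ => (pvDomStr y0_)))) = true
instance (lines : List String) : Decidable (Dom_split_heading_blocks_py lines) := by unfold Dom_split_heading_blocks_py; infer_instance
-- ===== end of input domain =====

-- B replaces A's stateful current_heading/current_lines accumulator loop with an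
-- index-then-slice decomposition (collect heading positions, pair each with the
-- next, slice out the bodies); objective: simpler.

-- ===== PORT A =====

-- exact port of Python's str.removeprefix
def pyRemoveprefix (s p : String) : String :=
  if PySem.Str.startswith s p then PySem.Str.slice s (some (PySem.Str.len p)) none else s

-- state: (blocks, current_heading, current_lines)
def StA : Type := List (String × List String) × Option String × List String

-- A's loop body
def stepA (s : StA) (line : String) : StA :=
  if PySem.Str.startswith line "### " then
    ((match s.2.1 with
      | some h => s.1 ++ [(h, s.2.2)]
      | none => s.1),
     some (PySem.Str.strip (pyRemoveprefix line "### ")), [])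
  else
    match s.2.1 with
    | some h => (s.1, some h, s.2.2 ++ [line])
    | none => s

-- A's epilogue after the loop
def finishA (st : StA) : List (String × List String) :=
  match st.2.1 with
  | some h => st.1 ++ [(h, st.2.2)]
  | none => st.1

def split_heading_blocks_py (lines : List String) : List (String × List String) :=
  finishA (lines.foldl stepA ([], none, []))

-- ===== PORT B =====
def split_heading_blocks_py_alt (lines : List String) : List (String × List String) :=
  let heads := (PySem.List.enumerate lines).filter (fun p => PySem.Str.startswith p.2 "### ")
  let ends := (heads.map Prod.fst).tail ++ [(lines.length : Int)]  -- [i for i,_ in heads][1:] + [len(lines)]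
  (heads.zip ends).map (fun pe =>
    (PySem.Str.strip (PySem.Str.slice pe.1.2 (some 4) none),
     PySem.List.slice lines (some (pe.1.1 + 1)) (some pe.2)))

-- ===== PRECONDITION & SPEC =====
def Spec_split_heading_blocks_py (lines : List String) (out : List (String × List String)) : Prop := out = split_heading_blocks_py_alt lines
instance (lines : List String) (out : List (String × List String)) : Decidable (Spec_split_heading_blocks_py lines out) := by unfold Spec_split_heading_blocks_py; infer_instance

-- ===== CLAIM (what is proved, stated in full; the proofs are below) =====
def Claim_equal_split_heading_blocks_py : Prop := ∀ (lines : List String), Dom_split_heading_blocks_py lines → Spec_split_heading_blocks_py lines (split_heading_blocks_py lines)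

-- ===== LEMMAS AND PROOFS =====

-- shorthand for the heading test
def isHead (l : String) : Bool := PySem.Str.startswith l "### "

-- the emitted title of a heading line
def emitH (l : String) : String := PySem.Str.strip (PySem.Str.slice l (some 4) none)

-- common recursive characterisation both ports are reduced to
def gBlocks : List String → List (String × List String)
  | [] => []
  | l :: ls =>
    if isHead l then
      (emitH l, ls.takeWhile (fun x => !isHead x)) :: gBlocks (ls.dropWhile (fun x => !isHead x))
    else gBlocks ls
termination_by ls => ls.length
decreasing_by
  · exact Nat.lt_succ_of_le (List.length_dropWhile_le _ _)
  · exact Nat.lt_succ_of_le (Nat.le_refl _)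

-- Nat-index view of B: heading positions paired with their lines
def headsN : List String → List (Nat × String)
  | [] => []
  | l :: ls =>
    (if isHead l then [(0, l)] else []) ++ (headsN ls).map (fun p => (p.1 + 1, p.2))

-- Nat-index view of B's comprehension
def mkB (lines : List String) (H : List (Nat × String)) : List (String × List String) :=
  (H.zip ((H.map Prod.fst).tail ++ [lines.length])).map
    (fun pe => (emitH pe.1.2, (lines.drop (pe.1.1 + 1)).take (pe.2 - (pe.1.1 + 1))))

-- index of the first heading (ls.length if none)
def firstIdx (ls : List String) : Nat :=
  match headsN ls with
  | [] => ls.length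
  | (i, _) :: _ => i

theorem removeprefix_of_isHead (l : String) (h : isHead l = true) :
    PySem.Str.strip (pyRemoveprefix l "### ") = emitH l := by
  unfold pyRemoveprefix emitH
  rw [show PySem.Str.startswith l "### " = true from h,
      show PySem.Str.len "### " = (4 : Int) from by decide]
  simp

-- A's loop, started with an active heading
theorem afold_some (ls : List String) (bs : List (String × List String)) (h : String) (cur : List String) :
    finishA (ls.foldl stepA (bs, some h, cur))
      = bs ++ (h, cur ++ ls.takeWhile (fun x => !isHead x))
          :: gBlocks (ls.dropWhile (fun x => !isHead x)) := by
  induction ls generalizing bs h cur with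
  | nil => simp [finishA, gBlocks]
  | cons l ls ih =>
    by_cases hl : isHead l = true
    · have hl' : PySem.Str.startswith l "### " = true := hl
      simp only [List.foldl_cons, stepA, hl', if_true]
      rw [ih, removeprefix_of_isHead l hl]
      simp only [List.takeWhile_cons, List.dropWhile_cons, hl, Bool.not_true, Bool.false_eq_true, if_false, List.append_nil]
      rw [show gBlocks (l :: ls) = (emitH l, ls.takeWhile (fun x => !isHead x)) :: gBlocks (ls.dropWhile (fun x => !isHead x)) from by rw [gBlocks]; simp [hl]]
      simp
    · have hl' : PySem.Str.startswith l "### " = false := by simpa [isHead] using hl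
      simp only [List.foldl_cons, stepA, hl', if_false, Bool.false_eq_true]
      rw [ih]
      simp [hl]

-- A's loop from the initial state computes gBlocks
theorem a_eq_g (lines : List String) : split_heading_blocks_py lines = gBlocks lines := by
  induction lines with
  | nil => simp [split_heading_blocks_py, finishA, gBlocks]
  | cons l ls ih =>
    by_cases hl : isHead l = true
    · have hl' : PySem.Str.startswith l "### " = true := hl
      unfold split_heading_blocks_py
      simp only [List.foldl_cons, stepA, hl', if_true]
      rw [afold_some, removeprefix_of_isHead l hl]
      rw [show gBlocks (l :: ls) = (emitH l, ls.takeWhile (fun x => !isHead x)) :: gBlocks (ls.dropWhile (fun x => !isHead x)) from by rw [gBlocks]; simp [hl]]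
      simp
    · have hl' : PySem.Str.startswith l "### " = false := by simpa [isHead] using hl
      unfold split_heading_blocks_py at *
      simp only [List.foldl_cons, stepA, hl', if_false, Bool.false_eq_true]
      rw [ih]
      rw [show gBlocks (l :: ls) = gBlocks ls from by rw [gBlocks]; simp [hl]]

-- enumerate + filter computes headsN (with the start offset cast)
theorem enumFilter (lines : List String) (n : Nat) :
    ((PySem.List.enumerate lines (n : Int)).filter (fun p => PySem.Str.startswith p.2 "### "))
      = (headsN lines).map (fun p => (((p.1 + n : Nat) : Int), p.2)) := by
  induction lines generalizing n with
  | nil => simp [PySem.List.enumerate, headsN]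
  | cons l ls ih =>
    rw [PySem.List.enumerate_cons,
        show ((n : Int) + 1) = ((n + 1 : Nat) : Int) from by push_cast; ring,
        List.filter_cons, ih (n + 1)]
    by_cases hl : isHead l = true
    · have hl' : PySem.Str.startswith l "### " = true := hl
      simp only [hl', if_true, headsN, hl, List.map_map, List.map_cons,
        List.singleton_append, List.cons.injEq]
      refine ⟨by simp, List.map_congr_left fun p _ => ?_⟩
      simp [Function.comp]
      ring
    · have hl' : PySem.Str.startswith l "### " = false := by simpa [isHead] using hl
      simp only [hl', Bool.false_eq_true, if_false, headsN, hl, List.map_map,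
        List.nil_append]
      refine List.map_congr_left fun p _ => ?_
      simp [Function.comp]
      ring

-- B computes mkB on the Nat-index view
theorem b_eq_mkB (lines : List String) :
    split_heading_blocks_py_alt lines = mkB lines (headsN lines) := by
  unfold split_heading_blocks_py_alt mkB
  rw [show ((0 : Int)) = ((0 : Nat) : Int) from rfl, enumFilter lines 0]
  simp only [Nat.add_zero]
  rw [show (List.map (fun p : Nat × String => (((p.1 : Nat) : Int), p.2)) (headsN lines)).map Prod.fst
        = (List.map Prod.fst (headsN lines)).map (fun i : Nat => (i : Int)) from by
      simp [List.map_map, Function.comp_def],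
      ← List.map_tail,
      show ([((lines.length : Nat) : Int)]) = (List.map (fun i : Nat => (i : Int)) [lines.length]) from rfl,
      ← List.map_append, List.zip_map, List.map_map]
  refine List.map_congr_left fun p _ => ?_
  simp only [Function.comp_def, Prod.map, emitH]
  rw [show (((p.1.1 : Nat) : Int) + 1) = ((p.1.1 + 1 : Nat) : Int) from by push_cast; ring,
      PySem.List.slice_natCast]

-- mkB ignores a prepended line once the indices are shifted
theorem mkB_shift (l : String) (ls : List String) (H : List (Nat × String)) :
    mkB (l :: ls) (H.map fun p => (p.1 + 1, p.2)) = mkB ls H := by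
  unfold mkB
  rw [show (((H.map fun p => (p.1 + 1, p.2)).map Prod.fst).tail ++ [(l :: ls).length])
        = ((H.map Prod.fst).tail ++ [ls.length]).map (fun i => i + 1) from by
      simp only [List.map_map, Function.comp_def, List.map_append, ← List.map_tail,
        List.length_cons, List.map_cons, List.map_nil],
      List.zip_map, List.map_map]
  refine List.map_congr_left fun p _ => ?_
  simp only [Function.comp_def, Prod.map, List.drop_succ_cons]
  refine congrArg _ (congrArg (fun n => List.take n (List.drop (p.1.1 + 1) ls)) ?_)
  omega

-- unfolding mkB over headsN on a cons
theorem mkB_cons (l : String) (ls : List String) :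
    mkB (l :: ls) (headsN (l :: ls))
      = if isHead l then (emitH l, ls.take (firstIdx ls)) :: mkB ls (headsN ls)
        else mkB ls (headsN ls) := by
  by_cases hl : isHead l = true
  · rw [if_pos hl, show headsN (l :: ls) = (0, l) :: (headsN ls).map (fun p => (p.1 + 1, p.2)) from by
      simp [headsN, hl]]
    rw [← mkB_shift l ls (headsN ls)]
    cases hH : headsN ls with
    | nil =>
      simp [mkB, firstIdx, hH, List.take_length]
    | cons h0 H' =>
      unfold mkB
      simp only [List.map_cons, List.map_map, List.tail_cons, List.cons_append, List.zip_cons_cons,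
        List.map_cons, firstIdx, hH]
      simp
  · rw [if_neg hl, show headsN (l :: ls) = (headsN ls).map (fun p => (p.1 + 1, p.2)) from by
      simp [headsN, hl]]
    exact mkB_shift l ls (headsN ls)

-- take/drop at the first heading index is takeWhile/dropWhile
theorem firstIdx_cons_neg (x : String) (xs : List String) (hx : ¬ isHead x = true) :
    firstIdx (x :: xs) = firstIdx xs + 1 := by
  unfold firstIdx
  rw [show headsN (x :: xs) = (headsN xs).map (fun p => (p.1 + 1, p.2)) from by simp [headsN, hx]]
  cases headsN xs <;> simp

theorem take_firstIdx (ls : List String) :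
    ls.take (firstIdx ls) = ls.takeWhile (fun x => !isHead x)
    ∧ ls.drop (firstIdx ls) = ls.dropWhile (fun x => !isHead x) := by
  induction ls with
  | nil => simp [firstIdx, headsN]
  | cons x xs ih =>
    by_cases hx : isHead x = true
    · have h0 : firstIdx (x :: xs) = 0 := by simp [firstIdx, headsN, hx]
      simp [h0, hx]
    · rw [firstIdx_cons_neg x xs hx]
      simp [hx, ih.1, ih.2]

-- gBlocks skips a non-heading prefix
theorem g_dropWhile (ls : List String) :
    gBlocks (ls.dropWhile (fun x => !isHead x)) = gBlocks ls := by
  induction ls with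
  | nil => rfl
  | cons l ls ih =>
    by_cases hl : isHead l = true
    · simp [hl]
    · rw [show gBlocks (l :: ls) = gBlocks ls from by rw [gBlocks]; simp [hl]]
      simp [hl, ih]

-- B computes gBlocks
theorem b_eq_g (lines : List String) : split_heading_blocks_py_alt lines = gBlocks lines := by
  rw [b_eq_mkB]
  induction lines with
  | nil => simp [mkB, headsN, gBlocks]
  | cons l ls ih =>
    rw [mkB_cons]
    by_cases hl : isHead l = true
    · rw [if_pos hl, ih, (take_firstIdx ls).1]
      rw [show gBlocks (l :: ls) = (emitH l, ls.takeWhile (fun x => !isHead x)) :: gBlocks (ls.dropWhile (fun x => !isHead x)) from by rw [gBlocks]; simp [hl]]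
      rw [g_dropWhile ls]
    · rw [if_neg hl, ih, show gBlocks (l :: ls) = gBlocks ls from by rw [gBlocks]; simp [hl]]

-- ===== VERDICT (by name: the statement is the Claim_ definition above) =====
theorem split_heading_blocks_py_spec : Claim_equal_split_heading_blocks_py := by
  intro lines _
  unfold Spec_split_heading_blocks_py
  rw [a_eq_g, b_eq_g]
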